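-- pv_equiv track=rewrite | github.com/austin-simmons/AdventOfCode2018 | day2/day2p2.py | dif_ids
-- ===== SOURCE A (Python) =====
-- def dif_ids(id_1: str, id_2: str):
--     diffs = []
--     res = []
--     for i in range(len(id_1)):
--         if id_1[i] != id_2[i]:
--             diffs.append(id_1[i])
--
--     if len(diffs) == 1:
--         for i in range(len(id_1)):
--             if id_1[i] == id_2[i]:
--                 res.append(id_1[i])
--
--         return ''.join(res)
-- ===== SOURCE B (Python) =====
-- def dif_ids(id_1: str, id_2: str):
--     # locate the differing positions instead of accumulating characters
--     diffs = [i for i in range(len(id_1)) if id_1[i] != id_2[i]]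
--     if len(diffs) == 1:
--         j = diffs[0]
--         return id_1[:j] + id_1[j+1:]
-- ===== Notes on version B (the rewrite author's own statement) =====
-- stated objective: simpler
-- what changed: B collects the differing INDICES in one comprehension and, if there is exactly one, slices that position out of id_1, replacing A's second character-collecting pass and join entirely.
import Mathlib
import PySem

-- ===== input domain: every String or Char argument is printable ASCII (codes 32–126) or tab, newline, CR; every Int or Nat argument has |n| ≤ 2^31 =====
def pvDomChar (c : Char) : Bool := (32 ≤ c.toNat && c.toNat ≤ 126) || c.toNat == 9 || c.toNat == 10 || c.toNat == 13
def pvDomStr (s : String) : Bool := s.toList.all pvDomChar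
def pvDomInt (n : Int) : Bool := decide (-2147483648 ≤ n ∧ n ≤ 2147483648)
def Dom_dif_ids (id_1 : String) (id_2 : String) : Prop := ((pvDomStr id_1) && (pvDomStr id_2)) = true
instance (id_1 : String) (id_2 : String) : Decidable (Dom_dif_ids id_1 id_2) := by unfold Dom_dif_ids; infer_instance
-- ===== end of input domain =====

-- B locates the single differing index in one pass and slices it out of id_1,
-- replacing A's second character-collecting pass and join (objective: simpler).


-- ===== PORT A =====
-- id_1[i] / id_2[i]: within Pre_ every index used is in range for both strings,
-- so List.getD with a dummy default computes exactly Python's indexing there.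
def dif_ids (id_1 : String) (id_2 : String) : Option String :=
  let l1 := id_1.toList
  let l2 := id_2.toList
  let diffs := (List.range l1.length).foldl
    (fun acc i => if l1.getD i ' ' ≠ l2.getD i ' ' then acc ++ [l1.getD i ' '] else acc) []
  if diffs.length = 1 then
    let res := (List.range l1.length).foldl
      (fun acc i => if l1.getD i ' ' = l2.getD i ' ' then acc ++ [l1.getD i ' '] else acc) []
    some (String.ofList res)
  else none

-- ===== PORT B =====
-- id_1[:j] with 0 ≤ j is take j and id_1[j+1:] is drop (j+1)
-- (PySem.List.slice_to_natCast / slice_from_natCast); indexing as in port A.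
def dif_ids_alt (id_1 : String) (id_2 : String) : Option String :=
  let l1 := id_1.toList
  let l2 := id_2.toList
  let diffs := (List.range l1.length).filter (fun i => l1.getD i ' ' ≠ l2.getD i ' ')
  match diffs with
  | [j] => some (String.ofList (l1.take j ++ l1.drop (j + 1)))
  | _ => none

-- ===== PRECONDITION & SPEC =====
-- Python A indexes id_2[i] for every i < len(id_1) and raises IndexError when id_2 is shorter;
-- Pre_ excludes exactly those inputs (B raises there too).
def Pre_dif_ids (id_1 : String) (id_2 : String) : Prop := id_1.toList.length ≤ id_2.toList.length
instance (id_1 : String) (id_2 : String) : Decidable (Pre_dif_ids id_1 id_2) := by unfold Pre_dif_ids; infer_instance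
def pvWitness_dif_ids : String × String := ("ab", "ac")

def Spec_dif_ids (id_1 : String) (id_2 : String) (out : Option String) : Prop := out = dif_ids_alt id_1 id_2
instance (id_1 : String) (id_2 : String) (out : Option String) : Decidable (Spec_dif_ids id_1 id_2 out) := by unfold Spec_dif_ids; infer_instance

-- ===== CLAIM (what is proved, stated in full; the proofs are below) =====
def Claim_equal_dif_ids : Prop := ∀ (id_1 : String) (id_2 : String), Dom_dif_ids id_1 id_2 → Pre_dif_ids id_1 id_2 → Spec_dif_ids id_1 id_2 (dif_ids id_1 id_2)

-- ===== LEMMAS AND PROOFS =====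

-- mapping index-lookup over range j is take j
theorem map_getD_range_take {l : List Char} {j : Nat} (h : j ≤ l.length) :
    (List.range j).map (fun i => l.getD i ' ') = l.take j := by
  apply List.ext_getElem
  · simp [Nat.min_eq_left h]
  · intro i h1 h2
    simp only [List.length_map, List.length_range] at h1
    simp only [List.getElem_map, List.getElem_range, List.getElem_take]
    rw [List.getD_eq_getElem]

-- mapping index-lookup over range' m k (m + k = length) is drop m
theorem map_getD_range'_drop {l : List Char} {m k : Nat} (h : m + k = l.length) :
    (List.range' m k).map (fun i => l.getD i ' ') = l.drop m := by
  apply List.ext_getElem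
  · simp; omega
  · intro i h1 h2
    simp only [List.length_map, List.length_range'] at h1
    simp only [List.getElem_map, List.getElem_range', List.getElem_drop]
    rw [List.getD_eq_getElem _ _ (by omega)]
    congr 1
    omega

-- a singleton filter over range pins down the predicate everywhere
theorem filter_singleton_facts {p : Nat → Bool} {n j : Nat}
    (h : (List.range n).filter p = [j]) :
    j < n ∧ p j = true ∧ ∀ i, i < n → i ≠ j → p i = false := by
  have hj : j ∈ (List.range n).filter p := by rw [h]; simp
  have hj' := List.mem_filter.mp hj
  refine ⟨List.mem_range.mp hj'.1, hj'.2, ?_⟩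
  intro i hi hne
  by_contra hpi
  have : i ∈ (List.range n).filter p :=
    List.mem_filter.mpr ⟨List.mem_range.mpr hi, by simpa using hpi⟩
  rw [h] at this
  simp at this
  exact hne this

-- ===== VERDICT (by name: the statement is the Claim_ definition above) =====
theorem dif_ids_spec : Claim_equal_dif_ids := by
  intro id_1 id_2 _ _
  unfold Spec_dif_ids dif_ids dif_ids_alt
  simp only
  set l1 := id_1.toList with hl1
  set l2 := id_2.toList with hl2
  rw [PySem.List.foldl_append_ite (p := fun i => l1.getD i ' ' ≠ l2.getD i ' ')
        (f := fun i => l1.getD i ' ') (l := List.range l1.length) (acc := []),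
      PySem.List.foldl_append_ite (p := fun i => l1.getD i ' ' = l2.getD i ' ')
        (f := fun i => l1.getD i ' ') (l := List.range l1.length) (acc := [])]
  simp only [List.nil_append, List.length_map]
  set p : Nat → Bool := fun i => decide (l1.getD i ' ' ≠ l2.getD i ' ') with hp
  have hneg : (List.range l1.length).filter (fun i => decide (l1.getD i ' ' = l2.getD i ' ')) =
      (List.range l1.length).filter (fun i => !p i) := by
    apply List.filter_congr
    intro i _
    simp [hp]
  rw [hneg]
  rcases hf : (List.range l1.length).filter p with _ | ⟨j, tl⟩
  · simp
  rcases tl with _ | ⟨k, tl'⟩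
  · -- exactly one differing index j: A's kept characters are l1 with position j removed
    obtain ⟨hjn, hpj, hother⟩ := filter_singleton_facts hf
    have hfilter : (List.range l1.length).filter (fun i => !p i) =
        List.range' 0 j ++ List.range' (j + 1) (l1.length - (j + 1)) := by
      have hsplit : List.range l1.length =
          List.range' 0 j ++ j :: List.range' (j + 1) (l1.length - (j + 1)) := by
        rw [List.range_eq_range']
        rw [show l1.length = j + (l1.length - j) from by omega]
        rw [← List.range'_append]
        congr 1
        rw [show 0 + 1 * j = j from by omega]
        rw [show l1.length - j = (l1.length - (j + 1)) + 1 from by omega, List.range'_succ]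
        congr 2
        omega
      rw [hsplit, List.filter_append, List.filter_cons]
      have h1 : (List.range' 0 j).filter (fun i => !p i) = List.range' 0 j := by
        apply List.filter_eq_self.mpr
        intro i hi
        have := List.mem_range'.mp hi
        simp [hother i (by omega) (by omega)]
      have h2 : (List.range' (j + 1) (l1.length - (j + 1))).filter (fun i => !p i) =
          List.range' (j + 1) (l1.length - (j + 1)) := by
        apply List.filter_eq_self.mpr
        intro i hi
        have := List.mem_range'.mp hi
        simp [hother i (by omega) (by omega)]
      simp [h1, h2, hpj]
    rw [hfilter, List.map_append]
    rw [show List.range' 0 j = List.range j from List.range_eq_range'.symm]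
    rw [map_getD_range_take (by omega), map_getD_range'_drop (by omega)]
    simp
  · simp
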